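-- pv_equiv track=rewrite | github.com/h3abionet/african_microbiome_portal | MicroBiome/string2query.py | str2eq
-- ===== SOURCE A (Python) =====
-- def val_type(vals):
--     """
--     Returns value and type.
--     Input: "Malawi[country]"
--     Output: ("Malawi", "country")
--
--     Input: "Malawi"
--     output:("Malawi", "all")
--     """
--     value, typ = "", ""
--     temp_type = False
--     for val in vals:
--         if val == "[":
--             temp_type = True
--             continue
--         if temp_type:
--             if val == "]":
--                 continue
--             typ += val
--         else:
--             value += val
--     if not value.strip():
--         return None
--     if not typ.strip():
--         typ = "all"
--     return value.strip(), typ.strip()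
--
-- def str2eq(strng):
--     """
--     Converts a given string to mathematical equation and operand dictionanry.
--     Input: "~amplicons | (South Africa[country] & cancer[disease]) | \
--             (Malawi[country] & Illumina[platform])"
--     output: A+(B*C)+(D*E) {'A': ('~amplicons', 'all'), \
--             'B': ('South Africa', 'country'), 'C': ('cancer', 'disease'), \
--             'D': ('Malawi', 'country'), 'E': ('Illumina', 'platform')}
--     """
--
--     init_chr = 65  # "A"
--     qvalue = ""
--     value_dict = {}
--     my_equation = ""
--     for character in strng:
--         if character in "(&|)":
--             if qvalue:
--                 vtype = val_type(qvalue)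
--                 if vtype:
--                     my_equation += chr(init_chr)
--                     value_dict[chr(init_chr)] = vtype
--                     init_chr += 1
--                 qvalue = ""
--             if character == "&":
--                 my_equation += "*"
--             elif character == "|":
--                 my_equation += "+"
--             else:
--                 my_equation += character
--         else:
--             qvalue += character
--
--     if qvalue:
--         my_equation += chr(init_chr)
--         value_dict[chr(init_chr)] = val_type(qvalue)
--
--     return my_equation, value_dict
-- ===== SOURCE B (Python) =====
-- def val_type(vals):
--     """
--     Returns value and type.  (unchanged from the original: its edge-case
--     behaviour -- all '[' / ']' stripped from the type part -- is preserved)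
--     """
--     value, typ = "", ""
--     temp_type = False
--     for val in vals:
--         if val == "[":
--             temp_type = True
--             continue
--         if temp_type:
--             if val == "]":
--                 continue
--             typ += val
--         else:
--             value += val
--     if not value.strip():
--         return None
--     if not typ.strip():
--         typ = "all"
--     return value.strip(), typ.strip()
--
--
-- def str2eq(strng):
--     """
--     Tokenize first, then interpret: mark every delimiter with NUL sentinels and
--     split, so the loop runs over whole tokens (text segments and single
--     delimiters) instead of single characters.
--     """
--     marked = strng
--     for d in "(&|)":
--         marked = marked.replace(d, "\x00" + d + "\x00")
--     eq_parts = []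
--     value_dict = {}
--     letter = 65  # "A"
--     for tok in marked.split("\x00"):
--         if not tok:
--             continue
--         if tok == "&":
--             eq_parts.append("*")
--         elif tok == "|":
--             eq_parts.append("+")
--         elif tok in "()":
--             eq_parts.append(tok)
--         else:
--             vt = val_type(tok)
--             if vt is not None:
--                 eq_parts.append(chr(letter))
--                 value_dict[chr(letter)] = vt
--                 letter += 1
--     return "".join(eq_parts), value_dict
-- ===== Notes on version B (the rewrite author's own statement) =====
-- stated objective: alternative
-- what changed: str2eq is rewritten as tokenize-then-interpret: delimiters are marked with NUL sentinels via replace and the string is split into whole tokens, which a single loop then maps to operators or operands, replacing A's fused character-by-character scan with a pending-qvalue accumulator and duplicated flush logic; val_type is kept verbatim.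
-- outside the precondition, e.g. on str2eq('['): A returns ('A', {'A': None}), B returns ('', {})
import Mathlib
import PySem

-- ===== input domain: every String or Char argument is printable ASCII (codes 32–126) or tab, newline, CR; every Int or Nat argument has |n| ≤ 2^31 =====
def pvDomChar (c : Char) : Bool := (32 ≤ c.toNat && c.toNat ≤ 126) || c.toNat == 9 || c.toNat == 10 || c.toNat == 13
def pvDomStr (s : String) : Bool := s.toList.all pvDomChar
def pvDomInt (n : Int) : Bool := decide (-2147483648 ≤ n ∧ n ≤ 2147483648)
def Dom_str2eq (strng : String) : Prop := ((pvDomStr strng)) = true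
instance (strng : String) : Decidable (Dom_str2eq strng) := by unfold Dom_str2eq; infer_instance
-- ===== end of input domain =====

-- B rewrites str2eq as tokenize-then-interpret (mark delimiters with NUL sentinels,
-- split, loop over whole tokens) instead of A's fused char-by-char scan; val_type unchanged.

-- ===== PORT A =====

-- `character in "(&|)"` — a delimiter character
def pvDelim (c : Char) : Bool := c == '(' || c == '&' || c == '|' || c == ')'

-- loop body of val_type (shared verbatim by Source A and Source B)
def pvVTStep (acc : List Char × List Char × Bool) (c : Char) : List Char × List Char × Bool :=
  if c == '[' then (acc.1, acc.2.1, true)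
  else if acc.2.2 then (if c == ']' then acc else (acc.1, acc.2.1 ++ [c], acc.2.2))
  else (acc.1 ++ [c], acc.2.1, acc.2.2)

-- post-loop part of val_type (strip checks, "all" default)
def pvVTFinish (st : List Char × List Char × Bool) : Option (String × String) :=
  if PySem.Chars.strip st.1 = [] then none
  else
    some (String.mk (PySem.Chars.strip st.1),
      String.mk (PySem.Chars.strip (if PySem.Chars.strip st.2.1 = [] then "all".toList else st.2.1)))

-- val_type (identical function in Source A and Source B)
def pvValType (vals : List Char) : Option (String × String) :=
  pvVTFinish (vals.foldl pvVTStep ([], [], false))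

-- loop body of A: state = (qvalue, value_dict, my_equation, init_chr)
def pvStepA (st : List Char × PySem.Dict String (String × String) × List Char × Nat) (c : Char) :
    List Char × PySem.Dict String (String × String) × List Char × Nat :=
  match st with
  | (q, d, e, n) =>
    if pvDelim c then
      let fl : PySem.Dict String (String × String) × List Char × Nat :=
        if q ≠ [] then
          match pvValType q with
          | some vt => (d.insert (String.mk [Char.ofNat n]) vt, e ++ [Char.ofNat n], n + 1)
          | none => (d, e, n)
        else (d, e, n)
      if c == '&' then ([], fl.1, fl.2.1 ++ ['*'], fl.2.2)
      else if c == '|' then ([], fl.1, fl.2.1 ++ ['+'], fl.2.2)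
      else ([], fl.1, fl.2.1 ++ [c], fl.2.2)
    else (q ++ [c], d, e, n)

-- A's post-loop flush; on the excluded inputs A stores Python None here
-- (val_type(qvalue) without a None check) — not a (str, str) value, see Pre_ below.
def pvFinishA (st : List Char × PySem.Dict String (String × String) × List Char × Nat) :
    String × List (String × String × String) :=
  match st with
  | (q, d, e, n) =>
    if q ≠ [] then
      (String.mk (e ++ [Char.ofNat n]),
       (d.insert (String.mk [Char.ofNat n]) ((pvValType q).getD ("", ""))).items)
    else (String.mk e, d.items)

def str2eq (strng : String) : String × (List (String × String × String)) :=
  pvFinishA (strng.toList.foldl pvStepA ([], PySem.Dict.empty, [], 65))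

-- ===== PORT B =====

-- loop body of B: state = (value_dict, eq_parts, letter); one whole token per step
def pvStepB (st : PySem.Dict String (String × String) × List (List Char) × Nat) (tok : List Char) :
    PySem.Dict String (String × String) × List (List Char) × Nat :=
  match st with
  | (d, e, n) =>
    if tok = [] then (d, e, n)
    else if tok = ['&'] then (d, e ++ [['*']], n)
    else if tok = ['|'] then (d, e ++ [['+']], n)
    else if PySem.Chars.isIn tok ['(', ')'] then (d, e ++ [tok], n)
    else
      match pvValType tok with
      | some vt => (d.insert (String.mk [Char.ofNat n]) vt, e ++ [[Char.ofNat n]], n + 1)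
      | none => (d, e, n)

def str2eq_alt (strng : String) : String × (List (String × String × String)) :=
  let marked := ['(', '&', '|', ')'].foldl
      (fun s dch => PySem.Chars.replace s [dch] ['\x00', dch, '\x00']) strng.toList
  let st := (PySem.Chars.splitOn marked ['\x00']).foldl pvStepB (PySem.Dict.empty, [], 65)
  (String.mk (PySem.Chars.join [] st.2.1), st.1.items)

-- ===== PRECONDITION & SPEC =====

-- Pre_ excludes strings whose segment after the last delimiter is nonempty but has a
-- whitespace-only value part: there A's final flush stores Python None (val_type's
-- failure result) in the dict — not a (str, str) value of the declared type.
def Pre_str2eq (strng : String) : Prop :=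
  let seg := (strng.toList.reverse.takeWhile (fun c => !pvDelim c)).reverse
  seg = [] ∨ PySem.Chars.strip (seg.takeWhile (fun c => !(c == '['))) ≠ []
instance (strng : String) : Decidable (Pre_str2eq strng) := by unfold Pre_str2eq; infer_instance

def pvWitness_str2eq : String := "South Africa[country] & cancer[disease]"

def Spec_str2eq (strng : String) (out : String × (List (String × String × String))) : Prop := out = str2eq_alt strng
instance (strng : String) (out : String × (List (String × String × String))) : Decidable (Spec_str2eq strng out) := by unfold Spec_str2eq; infer_instance

-- ===== CLAIM (what is proved, stated in full; the proofs are below) =====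
def Claim_equal_str2eq : Prop := ∀ (strng : String), Dom_str2eq strng → Pre_str2eq strng → Spec_str2eq strng (str2eq strng)

-- ===== LEMMAS AND PROOFS =====

-- B's packaging of its final state
def pvPackB (st : PySem.Dict String (String × String) × List (List Char) × Nat) :
    String × List (String × String × String) :=
  (String.mk st.2.1.flatten, st.1.items)

-- what marking a single character does
def pvEnc (c : Char) : List Char := if pvDelim c then ['\x00', c, '\x00'] else [c]

-- specification of splitting on NUL
def pvSplitList : List Char → List (List Char)
  | [] => [[]]
  | c :: rest => if c = '\x00' then [] :: pvSplitList rest else (pvSplitList rest).modifyHead (c :: ·)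

-- the pending value left after A's loop (text after the last delimiter)
def pvTrailing : List Char → List Char → List Char
  | q, [] => q
  | q, c :: cs => if pvDelim c then pvTrailing [] cs else pvTrailing (q ++ [c]) cs

-- the trailing segment is storable (empty, or val_type succeeds on it)
def pvGood (t : List Char) : Prop :=
  t = [] ∨ PySem.Chars.strip (t.takeWhile (fun c => !(c == '['))) ≠ []

lemma pvJoin_nil (l : List (List Char)) : PySem.Chars.join [] l = l.flatten := by
  induction l with
  | nil => rfl
  | cons a t ih =>
    cases t with
    | nil => simp [PySem.Chars.join, List.intercalate]
    | cons b u =>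
      simp only [PySem.Chars.join, List.intercalate] at ih ⊢
      rw [show List.intersperse ([] : List Char) (a :: b :: u)
            = a :: [] :: List.intersperse [] (b :: u) from rfl]
      simp only [List.flatten_cons, List.flatten_nil, List.nil_append]
      rw [ih]
      simp

lemma pvReplaceGo (d : Char) (r : List Char) :
    ∀ (l : List Char) (fuel : Nat) (acc : List Char), l.length ≤ fuel →
      PySem.Chars.replace.go [d] r fuel l acc
        = acc.reverse ++ l.flatMap (fun c => if c = d then r else [c]) := by
  intro l
  induction l with
  | nil => intro fuel acc h; cases fuel <;> simp [PySem.Chars.replace.go]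
  | cons c t ih =>
    intro fuel acc h
    cases fuel with
    | zero => simp at h
    | succ m =>
      by_cases hc : c = d
      · subst hc
        have hp : [c].isPrefixOf (c :: t) = true := by simp [List.isPrefixOf]
        simp only [PySem.Chars.replace.go, hp, if_true, List.length_cons, List.length_nil,
          List.drop_succ_cons, List.drop_zero]
        rw [ih m (r.reverse ++ acc) (by simpa using h)]
        simp
      · have hp : [d].isPrefixOf (c :: t) = false := by
          simp [List.isPrefixOf]; exact fun h' => absurd h'.symm hc
        simp only [PySem.Chars.replace.go, hp, Bool.false_eq_true, if_false]
        rw [ih m (c :: acc) (by simpa using h)]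
        simp [hc]

lemma pvReplace_single (s : List Char) (d : Char) (r : List Char) :
    PySem.Chars.replace s [d] r = s.flatMap (fun c => if c = d then r else [c]) := by
  rw [PySem.Chars.replace]
  simp only [List.isEmpty_cons, Bool.false_eq_true, if_false]
  rw [pvReplaceGo d r s s.length [] (le_refl _)]
  simp

lemma pvMarked (s : List Char) :
    ['(', '&', '|', ')'].foldl
        (fun t dch => PySem.Chars.replace t [dch] ['\x00', dch, '\x00']) s
      = s.flatMap pvEnc := by
  simp only [List.foldl_cons, List.foldl_nil, pvReplace_single, List.flatMap_assoc]
  induction s with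
  | nil => simp
  | cons c cs ih =>
    rw [List.flatMap_cons, List.flatMap_cons, ih]
    congr 1
    by_cases h1 : c = '(' <;> by_cases h2 : c = '&' <;> by_cases h3 : c = '|' <;>
      by_cases h4 : c = ')' <;> simp_all [pvEnc, pvDelim] <;> rfl

lemma pvSplitList_ne_nil (l : List Char) : pvSplitList l ≠ [] := by
  induction l with
  | nil => simp [pvSplitList]
  | cons c t ih =>
    by_cases h : c = '\x00' <;> simp [pvSplitList, h]
    cases hx : pvSplitList t with
    | nil => exact absurd hx ih
    | cons a b => simp

lemma pvModifyHead_nil (X : List (List Char)) :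
    X.modifyHead (fun tk => ([] : List Char) ++ tk) = X := by
  cases X <;> simp

lemma pvSplitGo :
    ∀ (l : List Char) (fuel : Nat) (cur : List Char) (acc : List (List Char)),
      l.length < fuel →
      PySem.Chars.splitOn.go ['\x00'] fuel l cur acc
        = acc.reverse ++ (pvSplitList l).modifyHead (cur.reverse ++ ·) := by
  intro l
  induction l with
  | nil =>
    intro fuel cur acc h
    cases fuel with
    | zero => omega
    | succ m => simp [PySem.Chars.splitOn.go, pvSplitList]
  | cons c t ih =>
    intro fuel cur acc h
    cases fuel with
    | zero => omega
    | succ m =>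
      by_cases hc : c = '\x00'
      · subst hc
        have hp : ['\x00'].isPrefixOf ('\x00' :: t) = true := by simp [List.isPrefixOf]
        simp only [PySem.Chars.splitOn.go, hp, if_true, List.length_cons, List.length_nil,
          List.drop_succ_cons, List.drop_zero]
        rw [ih m [] (cur.reverse :: acc) (by simpa using h)]
        cases hx : pvSplitList t with
        | nil => exact absurd hx (pvSplitList_ne_nil t)
        | cons a b => simp [pvSplitList, hx]
      · have hp : ['\x00'].isPrefixOf (c :: t) = false := by
          simp [List.isPrefixOf]; exact fun h' => absurd h'.symm hc
        simp only [PySem.Chars.splitOn.go, hp, Bool.false_eq_true, if_false]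
        rw [ih m (c :: cur) acc (by simpa using h)]
        cases hx : pvSplitList t with
        | nil => exact absurd hx (pvSplitList_ne_nil t)
        | cons a b => simp [pvSplitList, hx, hc]

lemma pvSplitOn_nul (s : List Char) :
    PySem.Chars.splitOn s ['\x00'] = pvSplitList s := by
  rw [PySem.Chars.splitOn, pvSplitGo s (s.length + 1) [] [] (by omega)]
  cases hx : pvSplitList s with
  | nil => exact absurd hx (pvSplitList_ne_nil s)
  | cons a b => simp

lemma pvVTStep_fst :
    ∀ (vals v ty : List Char) (b : Bool),
      (vals.foldl pvVTStep (v, ty, b)).1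
        = if b then v else v ++ vals.takeWhile (fun c => !(c == '[')) := by
  intro vals
  induction vals with
  | nil => intro v ty b; cases b <;> simp
  | cons c cs ih =>
    intro v ty b
    cases b with
    | true =>
      by_cases h1 : c = '['
      · simp [pvVTStep, h1, ih]
      · by_cases h2 : c = ']' <;> simp [pvVTStep, h1, h2, ih]
    | false =>
      by_cases h1 : c = '['
      · simp [pvVTStep, h1, ih, List.takeWhile_cons]
      · simp [pvVTStep, h1, ih, List.takeWhile_cons]

lemma pvValType_eq_none_iff (q : List Char) :
    pvValType q = none ↔ PySem.Chars.strip (q.takeWhile (fun c => !(c == '['))) = [] := by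
  have h := pvVTStep_fst q [] [] false
  simp only [if_false, List.nil_append, Bool.false_eq_true] at h
  unfold pvValType pvVTFinish
  rw [h]
  split_ifs with h1 <;> simp [h1]

lemma pvDelim_ne_nul (c : Char) (h : pvDelim c = true) : ¬ c = '\x00' := by
  intro hc; subst hc; simp [pvDelim] at h

lemma pvIsIn_parens (q : List Char) (hne : q ≠ []) (hq : ∀ c ∈ q, pvDelim c = false) :
    PySem.Chars.isIn q ['(', ')'] = false := by
  cases h : PySem.Chars.isIn q ['(', ')'] with
  | false => rfl
  | true =>
    exfalso
    have hinf := (PySem.Chars.isIn_iff_infix _ _).mp h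
    cases q with
    | nil => exact hne rfl
    | cons a t =>
      have ha : a ∈ ['(', ')'] := hinf.subset (by simp)
      have hd := hq a (by simp)
      simp only [List.mem_cons, List.mem_singleton, List.not_mem_nil, or_false] at ha
      rcases ha with ha | ha <;> (rw [ha] at hd; simp [pvDelim] at hd)

lemma pvTakeWhile_append_neg (p : Char → Bool) (xs ys : List Char) (c : Char)
    (hc : p c = false) : (xs ++ c :: ys).takeWhile p = xs.takeWhile p := by
  induction xs with
  | nil => simp [List.takeWhile_cons, hc]
  | cons a t ih =>
    by_cases h : p a <;> simp [List.takeWhile_cons, h, ih]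

lemma pvTrailing_eq (s : List Char) :
    ∀ (q : List Char), (∀ c ∈ q, pvDelim c = false) →
      pvTrailing q s = ((q ++ s).reverse.takeWhile (fun c => !pvDelim c)).reverse := by
  induction s with
  | nil =>
    intro q hq
    rw [pvTrailing]
    have : q.reverse.takeWhile (fun c => !pvDelim c) = q.reverse := by
      apply List.takeWhile_eq_self_iff.mpr
      intro a ha; simp [hq a (List.mem_reverse.mp ha)]
    simp [this]
  | cons c cs ih =>
    intro q hq
    by_cases hd : pvDelim c
    · rw [pvTrailing, if_pos hd, ih [] (by simp)]
      have : (q ++ c :: cs).reverse = cs.reverse ++ c :: q.reverse := by simp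
      rw [this, pvTakeWhile_append_neg _ _ _ c (by simp [hd])]
      simp
    · rw [pvTrailing, if_neg hd, ih (q ++ [c]) ?_]
      · simp
      · intro a ha
        rcases List.mem_append.mp ha with h | h
        · exact hq a h
        · simp at h; subst h; simpa using hd

lemma pvStepB_text (q : List Char) (hne : q ≠ []) (hq : ∀ c ∈ q, pvDelim c = false)
    (d : PySem.Dict String (String × String)) (eb : List (List Char)) (n : Nat) :
    pvStepB (d, eb, n) q
      = match pvValType q with
        | some vt => (d.insert (String.mk [Char.ofNat n]) vt, eb ++ [[Char.ofNat n]], n + 1)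
        | none => (d, eb, n) := by
  have h2 : ¬ q = ['&'] := by
    rintro rfl; have := hq '&' (by simp); simp [pvDelim] at this
  have h3 : ¬ q = ['|'] := by
    rintro rfl; have := hq '|' (by simp); simp [pvDelim] at this
  have h4 := pvIsIn_parens q hne hq
  rw [pvStepB]
  simp only [hne, h2, h3, h4, Bool.false_eq_true, if_false]

lemma pvMain :
    ∀ (s q : List Char) (d : PySem.Dict String (String × String))
      (eb : List (List Char)) (n : Nat),
      (∀ c ∈ s, ¬ c = '\x00') → (∀ c ∈ q, pvDelim c = false) →
      pvGood (pvTrailing q s) →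
      pvFinishA (s.foldl pvStepA (q, d, eb.flatten, n))
        = pvPackB (((pvSplitList (s.flatMap pvEnc)).modifyHead (q ++ ·)).foldl pvStepB (d, eb, n)) := by
  intro s
  induction s with
  | nil =>
    intro q d eb n _ hq hg
    simp only [List.foldl_nil, List.flatMap_nil, pvSplitList, List.modifyHead_cons,
      List.append_nil]
    by_cases hqe : q = []
    · simp [hqe, pvFinishA, pvStepB, pvPackB]
    · rw [List.foldl_cons, List.foldl_nil, pvStepB_text q hqe hq d eb n]
      have hgood : pvValType q ≠ none := by
        rw [pvTrailing] at hg
        rcases hg with h | h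
        · exact absurd h hqe
        · intro hnone; exact h ((pvValType_eq_none_iff q).mp hnone)
      cases hv : pvValType q with
      | none => exact absurd hv hgood
      | some vt =>
        rw [pvFinishA]
        simp [hqe, pvPackB, hv]
  | cons c cs ih =>
    intro q d eb n hnul hq hg
    have hnc : ¬ c = '\x00' := hnul c (by simp)
    have hncs : ∀ x ∈ cs, ¬ x = '\x00' := fun x hx => hnul x (by simp [hx])
    by_cases hd : pvDelim c
    · -- delimiter: tokens are q :: [c] :: rest
      have htok : (pvSplitList ((c :: cs).flatMap pvEnc)).modifyHead (q ++ ·)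
          = q :: [c] :: pvSplitList (cs.flatMap pvEnc) := by
        have h1 : (c :: cs).flatMap pvEnc = '\x00' :: c :: '\x00' :: cs.flatMap pvEnc := by
          simp [pvEnc, hd]
        rw [h1, pvSplitList, if_pos rfl, pvSplitList, if_neg (pvDelim_ne_nul c hd),
          pvSplitList, if_pos rfl]
        simp
      rw [htok, List.foldl_cons, List.foldl_cons, List.foldl_cons]
      -- the flush of q agrees on both sides
      have hgood' : pvGood (pvTrailing [] cs) := by
        rw [pvTrailing, if_pos hd] at hg; exact hg
      -- compute A's step
      rw [pvStepA]
      simp only [hd, if_true]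
      cases hqe : q with
      | nil =>
        simp only [ne_eq, not_true_eq_false, if_false, hqe]
        rw [show pvStepB (d, eb, n) [] = (d, eb, n) from by rw [pvStepB]; simp]
        -- now the operator token
        by_cases hamp : c = '&'
        · subst hamp
          rw [show pvStepB (d, eb, n) ['&'] = (d, eb ++ [['*']], n) from by rw [pvStepB]; simp]
          have := ih [] d (eb ++ [['*']]) n hncs (by simp) hgood'
          rw [pvModifyHead_nil] at this
          simpa using this
        · by_cases hbar : c = '|'
          · subst hbar
            rw [show pvStepB (d, eb, n) ['|'] = (d, eb ++ [['+']], n) from by rw [pvStepB]; simp]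
            have := ih [] d (eb ++ [['+']]) n hncs (by simp) hgood'
            rw [pvModifyHead_nil] at this
            simpa using this
          · have hpar : PySem.Chars.isIn [c] ['(', ')'] = true := by
              simp [pvDelim, hamp, hbar] at hd
              rcases hd with h | h <;> subst h <;> decide
            rw [show pvStepB (d, eb, n) [c] = (d, eb ++ [[c]], n) from by
              rw [pvStepB]
              have hc2 : ¬ [c] = ['&'] := by simp [hamp]
              have hc3 : ¬ [c] = ['|'] := by simp [hbar]
              simp [hc2, hc3, hpar]]
            have := ih [] d (eb ++ [[c]]) n hncs (by simp) hgood'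
            simp only [hamp, hbar, if_false, Bool.false_eq_true,
              show (c == '&') = false by simp [hamp],
              show (c == '|') = false by simp [hbar]]
            rw [pvModifyHead_nil] at this
            simpa using this
      | cons a t =>
        rw [← hqe, pvStepB_text q (by simp [hqe]) hq d eb n]
        simp only [hqe, ne_eq, reduceCtorEq, not_false_eq_true, if_true]
        rw [← hqe]
        cases hv : pvValType q with
        | none =>
          -- both sides skip the letter
          by_cases hamp : c = '&'
          · subst hamp
            rw [show pvStepB (d, eb, n) ['&'] = (d, eb ++ [['*']], n) from by rw [pvStepB]; simp]
            have := ih [] d (eb ++ [['*']]) n hncs (by simp) hgood'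
            rw [pvModifyHead_nil] at this
            simpa using this
          · by_cases hbar : c = '|'
            · subst hbar
              rw [show pvStepB (d, eb, n) ['|'] = (d, eb ++ [['+']], n) from by rw [pvStepB]; simp]
              have := ih [] d (eb ++ [['+']]) n hncs (by simp) hgood'
              rw [pvModifyHead_nil] at this
              simpa using this
            · have hpar : PySem.Chars.isIn [c] ['(', ')'] = true := by
                simp [pvDelim, hamp, hbar] at hd
                rcases hd with h | h <;> subst h <;> decide
              rw [show pvStepB (d, eb, n) [c] = (d, eb ++ [[c]], n) from by
                rw [pvStepB]
                have hc2 : ¬ [c] = ['&'] := by simp [hamp]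
                have hc3 : ¬ [c] = ['|'] := by simp [hbar]
                simp [hc2, hc3, hpar]]
              have := ih [] d (eb ++ [[c]]) n hncs (by simp) hgood'
              simp only [hamp, hbar,
                show (c == '&') = false by simp [hamp],
                show (c == '|') = false by simp [hbar], Bool.false_eq_true, if_false]
              rw [pvModifyHead_nil] at this
              simpa using this
        | some vt =>
          -- both sides record the letter first
          have hfl : eb.flatten ++ [Char.ofNat n] = (eb ++ [[Char.ofNat n]]).flatten := by simp
          by_cases hamp : c = '&'
          · subst hamp
            rw [show pvStepB (d.insert (String.mk [Char.ofNat n]) vt, eb ++ [[Char.ofNat n]], n + 1) ['&']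
                  = (d.insert (String.mk [Char.ofNat n]) vt, (eb ++ [[Char.ofNat n]]) ++ [['*']], n + 1) from by
              rw [pvStepB]; simp]
            have := ih [] (d.insert (String.mk [Char.ofNat n]) vt)
              ((eb ++ [[Char.ofNat n]]) ++ [['*']]) (n + 1) hncs (by simp) hgood'
            rw [pvModifyHead_nil] at this
            simpa using this
          · by_cases hbar : c = '|'
            · subst hbar
              rw [show pvStepB (d.insert (String.mk [Char.ofNat n]) vt, eb ++ [[Char.ofNat n]], n + 1) ['|']
                    = (d.insert (String.mk [Char.ofNat n]) vt, (eb ++ [[Char.ofNat n]]) ++ [['+']], n + 1) from by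
                rw [pvStepB]; simp]
              have := ih [] (d.insert (String.mk [Char.ofNat n]) vt)
                ((eb ++ [[Char.ofNat n]]) ++ [['+']]) (n + 1) hncs (by simp) hgood'
              rw [pvModifyHead_nil] at this
              simpa using this
            · have hpar : PySem.Chars.isIn [c] ['(', ')'] = true := by
                simp [pvDelim, hamp, hbar] at hd
                rcases hd with h | h <;> subst h <;> decide
              rw [show pvStepB (d.insert (String.mk [Char.ofNat n]) vt, eb ++ [[Char.ofNat n]], n + 1) [c]
                    = (d.insert (String.mk [Char.ofNat n]) vt, (eb ++ [[Char.ofNat n]]) ++ [[c]], n + 1) from by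
                rw [pvStepB]
                have hc2 : ¬ [c] = ['&'] := by simp [hamp]
                have hc3 : ¬ [c] = ['|'] := by simp [hbar]
                simp [hc2, hc3, hpar]]
              have := ih [] (d.insert (String.mk [Char.ofNat n]) vt)
                ((eb ++ [[Char.ofNat n]]) ++ [[c]]) (n + 1) hncs (by simp) hgood'
              simp only [hamp, hbar,
                show (c == '&') = false by simp [hamp],
                show (c == '|') = false by simp [hbar], Bool.false_eq_true, if_false]
              rw [pvModifyHead_nil] at this
              simpa using this
    · -- plain character: it joins the pending token
      have htok : (pvSplitList ((c :: cs).flatMap pvEnc)).modifyHead (q ++ ·)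
          = (pvSplitList (cs.flatMap pvEnc)).modifyHead ((q ++ [c]) ++ ·) := by
        have h1 : (c :: cs).flatMap pvEnc = c :: cs.flatMap pvEnc := by simp [pvEnc, hd]
        rw [h1, pvSplitList, if_neg hnc]
        cases hx : pvSplitList (cs.flatMap pvEnc) with
        | nil => exact absurd hx (pvSplitList_ne_nil _)
        | cons a b => simp
      rw [htok, List.foldl_cons, pvStepA]
      simp only [hd, Bool.false_eq_true, if_false]
      exact ih (q ++ [c]) d eb n hncs
        (by intro a ha
            rcases List.mem_append.mp ha with h | h
            · exact hq a h
            · simp at h; subst h; simpa using hd)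
        (by rw [pvTrailing, if_neg hd] at hg; exact hg)

-- ===== VERDICT (by name: the statement is the Claim_ definition above) =====
theorem str2eq_spec : Claim_equal_str2eq := by
  intro strng hdom hpre
  unfold Spec_str2eq
  have hnul : ∀ c ∈ strng.toList, ¬ c = '\x00' := by
    intro c hc hceq
    have := (List.all_eq_true.mp hdom) c hc
    subst hceq
    simp [pvDomChar] at this
  have hgood : pvGood (pvTrailing [] strng.toList) := by
    rw [pvTrailing_eq strng.toList [] (by simp)]
    simpa [pvGood, Pre_str2eq] using hpre
  have hmain := pvMain strng.toList [] PySem.Dict.empty [] 65 hnul (by simp) hgood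
  rw [str2eq]
  simp only [List.flatten_nil] at hmain
  rw [hmain, str2eq_alt]
  rw [pvMarked, pvSplitOn_nul]
  have hmh : (pvSplitList (strng.toList.flatMap pvEnc)).modifyHead (([] : List Char) ++ ·)
      = pvSplitList (strng.toList.flatMap pvEnc) := by
    cases hx : pvSplitList (strng.toList.flatMap pvEnc) with
    | nil => exact absurd hx (pvSplitList_ne_nil _)
    | cons a b => simp
  rw [hmh, pvPackB, pvJoin_nil]
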